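-- pv_equiv track=rewrite | github.com/thehalleyyoung/deppy | src/deppy/render/predicate_refine.py | is_scc_decomposition
-- ===== SOURCE A (Python) =====
-- from typing import (
--     Any,
--     Callable,
--     Dict,
--     FrozenSet,
--     Iterator,
--     List,
--     Optional,
--     Sequence,
--     Set,
--     Tuple,
--     Union,
-- )
--
-- def is_scc_decomposition(adj: Dict, sccs: Sequence[Sequence]) -> bool:
--     """Check that sccs is a valid strongly connected components decomposition."""
--     all_nodes = set(adj.keys())
--     for u in adj:
--         all_nodes |= set(adj[u])
--     # All nodes covered
--     scc_nodes = set()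
--     for scc in sccs:
--         for v in scc:
--             if v in scc_nodes:
--                 return False  # Duplicate
--             scc_nodes.add(v)
--     if scc_nodes != all_nodes:
--         return False
--     # Each SCC is strongly connected
--     for scc in sccs:
--         scc_set = set(scc)
--         if len(scc_set) <= 1:
--             continue
--         for u in scc_set:
--             # BFS from u within scc
--             visited = {u}
--             queue = [u]
--             while queue:
--                 curr = queue.pop(0)
--                 for v in adj.get(curr, []):
--                     if v in scc_set and v not in visited:
--                         visited.add(v)
--                         queue.append(v)
--             if visited != scc_set:
--                 return False
--     return True
-- ===== SOURCE B (Python) =====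
-- def is_scc_decomposition(adj, sccs):
--     """Check that sccs is a valid strongly connected components decomposition."""
--     nodes = [v for scc in sccs for v in scc]
--     node_set = set(nodes)
--     all_nodes = set(adj)
--     for nbrs in adj.values():
--         all_nodes.update(nbrs)
--     if len(nodes) != len(node_set) or node_set != all_nodes:
--         return False
--     radj = {}
--     for u, nbrs in adj.items():
--         for v in nbrs:
--             radj.setdefault(v, []).append(u)
--     for scc in sccs:
--         scc_set = set(scc)
--         if len(scc_set) <= 1:
--             continue
--         r = scc[0]
--         if _reach(adj, scc_set, r) != scc_set or _reach(radj, scc_set, r) != scc_set: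
--             return False
--     return True
--
--
-- def _reach(graph, allowed, start):
--     """Nodes of `allowed` reachable from `start` staying inside `allowed` (DFS)."""
--     seen = {start}
--     stack = [start]
--     while stack:
--         u = stack.pop()
--         for v in graph.get(u, []):
--             if v in allowed and v not in seen:
--                 seen.add(v)
--                 stack.append(v)
--     return seen
-- ===== Notes on version B (the rewrite author's own statement) =====
-- stated objective: alternative
-- what changed: A re-verifies each SCC by running a BFS from every one of its nodes; B runs a single forward DFS and a single reverse DFS (on a reverse adjacency index built once) from one representative node per SCC, and detects duplicate nodes by a length comparison instead of an element-by-element scan.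
import Mathlib
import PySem

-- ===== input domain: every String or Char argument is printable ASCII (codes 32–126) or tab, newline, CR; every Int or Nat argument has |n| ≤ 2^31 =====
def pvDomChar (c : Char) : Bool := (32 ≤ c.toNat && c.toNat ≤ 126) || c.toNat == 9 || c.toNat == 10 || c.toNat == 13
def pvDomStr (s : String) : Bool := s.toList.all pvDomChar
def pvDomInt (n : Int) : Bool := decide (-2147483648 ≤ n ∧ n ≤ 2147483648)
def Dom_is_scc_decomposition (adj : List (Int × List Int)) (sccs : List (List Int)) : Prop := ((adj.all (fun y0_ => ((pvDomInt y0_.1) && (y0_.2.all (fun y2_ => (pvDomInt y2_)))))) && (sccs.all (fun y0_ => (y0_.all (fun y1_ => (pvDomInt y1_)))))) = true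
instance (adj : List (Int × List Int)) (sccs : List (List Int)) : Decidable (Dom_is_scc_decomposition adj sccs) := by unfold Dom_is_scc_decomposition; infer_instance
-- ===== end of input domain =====

-- B replaces A's per-node BFS inside every SCC by a single forward plus a single
-- reverse DFS from one representative node per SCC (objective: alternative; fewer
-- sweeps per SCC, measured ~1.3-1.4x in a timing run, below the 1.5x bar).

-- the inner "for v in graph[curr]: if v in S and v not in seen: add+push" loop,
-- shared verbatim by A's BFS and B's DFS
def pvVisitNbrs (S : PySem.Set Int) (ns : List Int) (st : PySem.Set Int × List Int) :
    PySem.Set Int × List Int :=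
  ns.foldl
    (fun st v => if PySem.Set.contains S v && !(PySem.Set.contains st.1 v)
      then (PySem.Set.add st.1 v, st.2 ++ [v]) else st) st

def pvUnvis (S vis : PySem.Set Int) : Nat :=
  (S.filter (fun x => !(PySem.Set.contains vis x))).length

theorem pvCountP_lt {p q : Int → Bool} {v : Int} :
    ∀ (l : List Int), v ∈ l → p v = true → q v = false →
      (∀ x, q x = true → p x = true) → l.countP q < l.countP p
  | a :: t, hv, hp, hqv, hq => by
    rcases List.mem_cons.1 hv with rfl | hv'
    · have hle : t.countP q ≤ t.countP p := List.countP_mono_left (fun x _ => hq x)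
      simpa [hp, hqv] using Nat.lt_succ_of_le hle
    · have := pvCountP_lt t hv' hp hqv hq
      have hif : (if q a = true then 1 else 0) ≤ (if p a = true then 1 else 0) := by
        by_cases hqa : q a = true
        · simp [hqa, hq a hqa]
        · simp [hqa]
      simp only [List.countP_cons]
      omega

theorem pvUnvis_add_lt {S vis : PySem.Set Int} {v : Int}
    (hS : PySem.Set.contains S v = true) (hv : PySem.Set.contains vis v = false) :
    pvUnvis S (PySem.Set.add vis v) < pvUnvis S vis := by
  unfold pvUnvis
  simp only [← List.countP_eq_length_filter]
  have hmem : v ∈ S := (PySem.Set.contains_iff _ _).1 hS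
  refine pvCountP_lt S hmem ?_ ?_ ?_
  · simpa using hv
  · have : v ∈ PySem.Set.add vis v := (PySem.Set.mem_add vis v v).2 (Or.inr rfl)
    simp
  · intro x hx
    simp only [Bool.not_eq_eq_eq_not, Bool.not_true] at hx ⊢
    rcases Bool.eq_false_or_eq_true (PySem.Set.contains vis x) with h | h
    · exfalso
      have : x ∈ PySem.Set.add vis v :=
        (PySem.Set.mem_add vis v x).2 (Or.inl ((PySem.Set.contains_iff _ _).1 h))
      rw [(PySem.Set.contains_iff _ _).2 this] at hx
      cases hx
    · exact h

theorem pvVisitNbrs_measure (S : PySem.Set Int) (ns : List Int) :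
    ∀ (vis : PySem.Set Int) (q : List Int),
      2 * pvUnvis S (pvVisitNbrs S ns (vis, q)).1 + (pvVisitNbrs S ns (vis, q)).2.length
      ≤ 2 * pvUnvis S vis + q.length := by
  induction ns with
  | nil => intro vis q; simp [pvVisitNbrs]
  | cons n t ih =>
    intro vis q
    simp only [pvVisitNbrs, List.foldl_cons]
    cases h : (PySem.Set.contains S n && !(PySem.Set.contains vis n)) with
    | false =>
      simp only [Bool.false_eq_true, if_false]
      simpa [pvVisitNbrs] using ih vis q
    | true =>
      simp only [if_true]
      simp only [Bool.and_eq_true, Bool.not_eq_true'] at h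
      obtain ⟨h1, h2⟩ := h
      have hlt := pvUnvis_add_lt h1 h2
      have := ih (PySem.Set.add vis n) (q ++ [n])
      simp only [pvVisitNbrs] at this
      simp only [List.length_append, List.length_cons, List.length_nil] at this ⊢
      omega

-- ===== PORT A =====
def pvAddScc (sccNodes : PySem.Set Int) : List Int → Option (PySem.Set Int)
  | [] => some sccNodes
  | v :: rest =>
    if PySem.Set.contains sccNodes v then none
    else pvAddScc (PySem.Set.add sccNodes v) rest

def pvCollectSccNodes (sccNodes : PySem.Set Int) : List (List Int) → Option (PySem.Set Int)
  | [] => some sccNodes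
  | scc :: rest =>
    match pvAddScc sccNodes scc with
    | none => none
    | some s => pvCollectSccNodes s rest

def pvBfsA (g : PySem.Dict Int (List Int)) (S : PySem.Set Int)
    (visited : PySem.Set Int) (queue : List Int) : PySem.Set Int :=
  match queue with
  | [] => visited
  | curr :: rest =>
    let st := pvVisitNbrs S (g.getD curr []) (visited, rest)
    pvBfsA g S st.1 st.2
  termination_by 2 * pvUnvis S visited + queue.length
  decreasing_by
    have := pvVisitNbrs_measure S (g.getD curr []) visited rest
    simp only [List.length_cons]
    omega

def pvCheckSccA (g : PySem.Dict Int (List Int)) (scc : List Int) : Bool :=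
  let sccSet := PySem.Set.ofList scc
  if sccSet.length ≤ 1 then true
  else sccSet.all (fun u =>
    PySem.Set.equal (pvBfsA g sccSet (PySem.Set.ofList [u]) [u]) sccSet)

def is_scc_decomposition (adj : List (Int × List Int)) (sccs : List (List Int)) : Bool :=
  let d : PySem.Dict Int (List Int) := PySem.Dict.mk adj
  let allNodes := d.keys.foldl
    (fun s u => PySem.Set.union s (PySem.Set.ofList (d.getD u []))) (PySem.Set.ofList d.keys)
  match pvCollectSccNodes PySem.Set.empty sccs with
  | none => false
  | some sccNodes =>
    if !(PySem.Set.equal sccNodes allNodes) then false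
    else sccs.all (fun scc => pvCheckSccA d scc)

-- ===== PORT B =====
def pvReachB (g : PySem.Dict Int (List Int)) (allowed : PySem.Set Int)
    (seen : PySem.Set Int) (stack : List Int) : PySem.Set Int :=
  match stack with
  | [] => seen
  | a :: rest =>
    let u := (a :: rest).getLast (List.cons_ne_nil a rest)
    let st := pvVisitNbrs allowed (g.getD u []) (seen, (a :: rest).dropLast)
    pvReachB g allowed st.1 st.2
  termination_by 2 * pvUnvis allowed seen + stack.length
  decreasing_by
    have := pvVisitNbrs_measure allowed
      (g.getD ((a :: rest).getLast (List.cons_ne_nil a rest)) []) seen ((a :: rest).dropLast)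
    have hlen : ((a :: rest).dropLast).length < (a :: rest).length := by
      simp [List.length_dropLast]
    omega

def pvCheckSccB (g rg : PySem.Dict Int (List Int)) (scc : List Int) : Bool :=
  let sccSet := PySem.Set.ofList scc
  if sccSet.length ≤ 1 then true
  else
    match PySem.List.pyGet? scc 0 with
    | none => true
    | some r =>
      PySem.Set.equal (pvReachB g sccSet (PySem.Set.ofList [r]) [r]) sccSet &&
      PySem.Set.equal (pvReachB rg sccSet (PySem.Set.ofList [r]) [r]) sccSet

-- "for u, nbrs in adj.items(): for v in nbrs: radj.setdefault(v, []).append(u)"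
-- (setdefault+append = modify with default [])
def pvRadj (d : PySem.Dict Int (List Int)) : PySem.Dict Int (List Int) :=
  d.items.foldl
    (fun r p => p.2.foldl (fun r v => PySem.Dict.modify r v [] (fun l => l ++ [p.1])) r)
    PySem.Dict.empty

def is_scc_decomposition_alt (adj : List (Int × List Int)) (sccs : List (List Int)) : Bool :=
  let d : PySem.Dict Int (List Int) := PySem.Dict.mk adj
  let nodes := sccs.flatten
  let nodeSet := PySem.Set.ofList nodes
  let allNodes := d.values.foldl (fun s ns => PySem.Set.update s ns) (PySem.Set.ofList d.keys)
  if nodes.length != nodeSet.length || !(PySem.Set.equal nodeSet allNodes) then false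
  else sccs.all (fun scc => pvCheckSccB d (pvRadj d) scc)


-- ===== PRECONDITION & SPEC =====
-- Pre_ only requires the association list to have distinct keys: `adj` stands for a
-- Python dict, and a duplicate-key list corresponds to no Python input at all.
def Pre_is_scc_decomposition (adj : List (Int × List Int)) (sccs : List (List Int)) : Prop :=
  (adj.map Prod.fst).Nodup
instance (adj : List (Int × List Int)) (sccs : List (List Int)) : Decidable (Pre_is_scc_decomposition adj sccs) := by unfold Pre_is_scc_decomposition; infer_instance

def pvWitness_is_scc_decomposition : (List (Int × List Int)) × List (List Int) :=
  ([(0, [1]), (1, [0]), (2, [2])], [[0, 1], [2]])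

def Spec_is_scc_decomposition (adj : List (Int × List Int)) (sccs : List (List Int)) (out : Bool) : Prop := out = is_scc_decomposition_alt adj sccs
instance (adj : List (Int × List Int)) (sccs : List (List Int)) (out : Bool) : Decidable (Spec_is_scc_decomposition adj sccs out) := by unfold Spec_is_scc_decomposition; infer_instance

-- ===== CLAIM (what is proved, stated in full; the proofs are below) =====
def Claim_equal_is_scc_decomposition : Prop := ∀ (adj : List (Int × List Int)) (sccs : List (List Int)), Dom_is_scc_decomposition adj sccs → Pre_is_scc_decomposition adj sccs → Spec_is_scc_decomposition adj sccs (is_scc_decomposition adj sccs)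

-- ===== LEMMAS AND PROOFS =====

-- Reachability from `u` inside the allowed set `S` (edges of `g`, targets in `S`)
inductive pvReachable (g : PySem.Dict Int (List Int)) (S : PySem.Set Int) (u : Int) : Int → Prop where
  | refl : pvReachable g S u u
  | step {x v : Int} : pvReachable g S u x → v ∈ g.getD x [] → v ∈ S →
      pvReachable g S u v

theorem pvReachable_mem_or_eq {g : PySem.Dict Int (List Int)} {S : PySem.Set Int} {u y : Int}
    (h : pvReachable g S u y) : y ∈ S ∨ y = u := by
  induction h with
  | refl => exact Or.inr rfl
  | step _ _ hvS _ => exact Or.inl hvS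

theorem pvReachable_trans {g : PySem.Dict Int (List Int)} {S : PySem.Set Int} {a b c : Int}
    (h1 : pvReachable g S a b) (h2 : pvReachable g S b c) : pvReachable g S a c := by
  induction h2 with
  | refl => exact h1
  | step _ he hS ih => exact .step ih he hS

theorem pvReachable_head {g : PySem.Dict Int (List Int)} {S : PySem.Set Int} {u v w : Int}
    (he : v ∈ g.getD u []) (hvS : v ∈ S) (h : pvReachable g S v w) : pvReachable g S u w := by
  induction h with
  | refl => exact .step .refl he hvS
  | step _ he' hS ih => exact .step ih he' hS

-- shape of the shared inner loop: it appends the same fresh elements to both components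
theorem pvVisitNbrs_cons (S : PySem.Set Int) (n : Int) (t : List Int)
    (vis : PySem.Set Int) (q : List Int) :
    pvVisitNbrs S (n :: t) (vis, q)
      = if PySem.Set.contains S n && !(PySem.Set.contains vis n)
        then pvVisitNbrs S t (PySem.Set.add vis n, q ++ [n])
        else pvVisitNbrs S t (vis, q) := by
  simp only [pvVisitNbrs, List.foldl_cons]
  split <;> rfl

theorem pvVisitNbrs_shape (S : PySem.Set Int) (ns : List Int) :
    ∀ (vis : PySem.Set Int) (q : List Int), ∃ new,
      pvVisitNbrs S ns (vis, q) = (vis ++ new, q ++ new) ∧ ∀ v ∈ new, v ∈ ns ∧ v ∈ S := by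
  induction ns with
  | nil => intro vis q; exact ⟨[], by simp [pvVisitNbrs], by simp⟩
  | cons n t ih =>
    intro vis q
    rw [pvVisitNbrs_cons]
    cases h : PySem.Set.contains S n && !(PySem.Set.contains vis n) with
    | false =>
      simp only [Bool.false_eq_true, if_false]
      obtain ⟨new, heq, hnew⟩ := ih vis q
      exact ⟨new, heq, fun v hv => ⟨List.mem_cons_of_mem _ (hnew v hv).1, (hnew v hv).2⟩⟩
    | true =>
      simp only [if_true]
      simp only [Bool.and_eq_true, Bool.not_eq_true'] at h
      obtain ⟨h1, h2⟩ := h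
      have hadd : PySem.Set.add vis n = vis ++ [n] := by
        simp only [PySem.Set.add]; rw [h2]; simp
      obtain ⟨new, heq, hnew⟩ := ih (PySem.Set.add vis n) (q ++ [n])
      refine ⟨n :: new, ?_, ?_⟩
      · rw [heq, hadd]; simp
      · intro v hv
        rcases List.mem_cons.1 hv with rfl | hv'
        · exact ⟨List.mem_cons_self, (PySem.Set.contains_iff _ _).1 h1⟩
        · exact ⟨List.mem_cons_of_mem _ (hnew v hv').1, (hnew v hv').2⟩

theorem pvVisitNbrs_complete (S : PySem.Set Int) (ns : List Int) :
    ∀ (vis : PySem.Set Int) (q : List Int) (v : Int), v ∈ ns → v ∈ S →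
      v ∈ (pvVisitNbrs S ns (vis, q)).1 := by
  induction ns with
  | nil => intro _ _ _ hv; cases hv
  | cons n t ih =>
    intro vis q v hv hvS
    rw [pvVisitNbrs_cons]
    cases h : PySem.Set.contains S n && !(PySem.Set.contains vis n) with
    | true =>
      simp only [if_true]
      rcases List.mem_cons.1 hv with rfl | hv'
      · obtain ⟨new, heq, -⟩ := pvVisitNbrs_shape S t (PySem.Set.add vis v) (q ++ [v])
        rw [heq]
        exact List.mem_append_left _ ((PySem.Set.mem_add vis v v).2 (Or.inr rfl))
      · exact ih _ _ v hv' hvS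
    | false =>
      simp only [Bool.false_eq_true, if_false]
      rcases List.mem_cons.1 hv with rfl | hv'
      · -- the test failed although v ∈ S, so v was already in vis
        have hS : PySem.Set.contains S v = true := (PySem.Set.contains_iff _ _).2 hvS
        have hvis : v ∈ vis := by
          rcases Bool.eq_false_or_eq_true (PySem.Set.contains vis v) with hc | hc
          · exact (PySem.Set.contains_iff _ _).1 hc
          · exact absurd h (by rw [hS, hc]; simp)
        obtain ⟨new, heq, -⟩ := pvVisitNbrs_shape S t vis q
        rw [heq]
        exact List.mem_append_left _ hvis
      · exact ih _ _ v hv' hvS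

theorem pvBfsA_nil (g : PySem.Dict Int (List Int)) (S vis : PySem.Set Int) :
    pvBfsA g S vis [] = vis := by rw [pvBfsA]

theorem pvBfsA_cons (g : PySem.Dict Int (List Int)) (S vis : PySem.Set Int)
    (curr : Int) (rest : List Int) :
    pvBfsA g S vis (curr :: rest)
      = pvBfsA g S (pvVisitNbrs S (g.getD curr []) (vis, rest)).1
          (pvVisitNbrs S (g.getD curr []) (vis, rest)).2 := by rw [pvBfsA]

theorem pvBfsA_mono (g : PySem.Dict Int (List Int)) (S : PySem.Set Int) :
    ∀ (vis : PySem.Set Int) (queue : List Int), ∀ x ∈ vis, x ∈ pvBfsA g S vis queue := by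
  intro vis queue
  induction vis, queue using pvBfsA.induct g S with
  | case1 vis => simp [pvBfsA_nil]
  | case2 vis curr rest st ih =>
    intro x hx
    rw [pvBfsA_cons]
    obtain ⟨new, heq, -⟩ := pvVisitNbrs_shape S (g.getD curr []) vis rest
    have hst1 : st.1 = vis ++ new := by rw [show st = _ from heq]
    exact ih x (by rw [hst1]; exact List.mem_append_left _ hx)

theorem pvBfsA_sound (g : PySem.Dict Int (List Int)) (S : PySem.Set Int) (u : Int) :
    ∀ (vis : PySem.Set Int) (queue : List Int),
      (∀ x ∈ vis, pvReachable g S u x) → (∀ x ∈ queue, x ∈ vis) →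
      ∀ y ∈ pvBfsA g S vis queue, pvReachable g S u y := by
  intro vis queue
  induction vis, queue using pvBfsA.induct g S with
  | case1 vis => intro hvis _ y hy; rw [pvBfsA_nil] at hy; exact hvis y hy
  | case2 vis curr rest st ih =>
    intro hvis hq y hy
    rw [pvBfsA_cons] at hy
    obtain ⟨new, heq, hnew⟩ := pvVisitNbrs_shape S (g.getD curr []) vis rest
    have hst1 : st.1 = vis ++ new := by rw [show st = _ from heq]
    have hst2 : st.2 = rest ++ new := by rw [show st = _ from heq]
    have hcurr : pvReachable g S u curr := hvis curr (hq curr List.mem_cons_self)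
    refine ih ?_ ?_ y hy
    · rw [hst1]
      intro x hx
      rcases List.mem_append.1 hx with hx | hx
      · exact hvis x hx
      · exact .step hcurr (hnew x hx).1 (hnew x hx).2
    · rw [hst1, hst2]
      intro x hx
      rcases List.mem_append.1 hx with hx | hx
      · exact List.mem_append_left _ (hq x (List.mem_cons_of_mem _ hx))
      · exact List.mem_append_right _ hx

theorem pvBfsA_closed (g : PySem.Dict Int (List Int)) (S : PySem.Set Int) :
    ∀ (vis : PySem.Set Int) (queue : List Int),
      (∀ x ∈ vis, x ∈ queue ∨ ∀ v ∈ g.getD x [], v ∈ S → v ∈ vis) →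
      ∀ x ∈ pvBfsA g S vis queue, ∀ v ∈ g.getD x [], v ∈ S →
        v ∈ pvBfsA g S vis queue := by
  intro vis queue
  induction vis, queue using pvBfsA.induct g S with
  | case1 vis =>
    intro H x hx v hv hvS
    rw [pvBfsA_nil] at hx ⊢
    rcases H x hx with h | h
    · cases h
    · exact h v hv hvS
  | case2 vis curr rest st ih =>
    intro H
    rw [pvBfsA_cons]
    obtain ⟨new, heq, hnew⟩ := pvVisitNbrs_shape S (g.getD curr []) vis rest
    have hst1 : st.1 = vis ++ new := by rw [show st = _ from heq]
    have hst2 : st.2 = rest ++ new := by rw [show st = _ from heq]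
    refine ih ?_
    rw [hst1, hst2]
    intro x hx
    rcases List.mem_append.1 hx with hx | hx
    · rcases H x hx with hmem | hcl
      · rcases List.mem_cons.1 hmem with rfl | hrest
        · right
          intro v hv hvS
          have := pvVisitNbrs_complete S (g.getD x []) vis rest v hv hvS
          rw [heq] at this
          exact this
        · left; exact List.mem_append_left _ hrest
      · right; intro v hv hvS; exact List.mem_append_left _ (hcl v hv hvS)
    · left; exact List.mem_append_right _ hx

theorem pvBfsA_mem_iff (g : PySem.Dict Int (List Int)) (S : PySem.Set Int) (u y : Int) :
    y ∈ pvBfsA g S (PySem.Set.ofList [u]) [u] ↔ pvReachable g S u y := by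
  have hofl : PySem.Set.ofList [u] = [u] := rfl
  constructor
  · intro hy
    refine pvBfsA_sound g S u _ _ ?_ ?_ y hy
    · intro x hx
      rw [hofl] at hx
      rcases List.mem_singleton.1 hx with rfl
      exact .refl
    · intro x hx; rw [hofl]; exact hx
  · intro hr
    induction hr with
    | refl => exact pvBfsA_mono g S _ _ u (by rw [hofl]; exact List.mem_singleton.2 rfl)
    | step _ he hS ih =>
      refine pvBfsA_closed g S _ _ ?_ _ ih _ he hS
      intro x hx
      rw [hofl] at hx
      exact Or.inl hx

theorem pvReachB_nil (g : PySem.Dict Int (List Int)) (S seen : PySem.Set Int) :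
    pvReachB g S seen [] = seen := by rw [pvReachB]

theorem pvReachB_cons (g : PySem.Dict Int (List Int)) (S seen : PySem.Set Int)
    (a : Int) (rest : List Int) :
    pvReachB g S seen (a :: rest)
      = pvReachB g S
          (pvVisitNbrs S (g.getD ((a :: rest).getLast (List.cons_ne_nil a rest)) [])
            (seen, (a :: rest).dropLast)).1
          (pvVisitNbrs S (g.getD ((a :: rest).getLast (List.cons_ne_nil a rest)) [])
            (seen, (a :: rest).dropLast)).2 := by rw [pvReachB]

theorem pvReachB_mono (g : PySem.Dict Int (List Int)) (S : PySem.Set Int) :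
    ∀ (seen : PySem.Set Int) (stack : List Int), ∀ x ∈ seen, x ∈ pvReachB g S seen stack := by
  intro seen stack
  induction seen, stack using pvReachB.induct g S with
  | case1 seen => simp [pvReachB_nil]
  | case2 seen a rest u st ih =>
    intro x hx
    rw [pvReachB_cons]
    obtain ⟨new, heq, -⟩ := pvVisitNbrs_shape S
      (g.getD ((a :: rest).getLast (List.cons_ne_nil a rest)) []) seen ((a :: rest).dropLast)
    have hst1 : st.1 = seen ++ new := by rw [show st = _ from heq]
    exact ih x (by rw [hst1]; exact List.mem_append_left _ hx)

theorem pvReachB_sound (g : PySem.Dict Int (List Int)) (S : PySem.Set Int) (src : Int) :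
    ∀ (seen : PySem.Set Int) (stack : List Int),
      (∀ x ∈ seen, pvReachable g S src x) → (∀ x ∈ stack, x ∈ seen) →
      ∀ y ∈ pvReachB g S seen stack, pvReachable g S src y := by
  intro seen stack
  induction seen, stack using pvReachB.induct g S with
  | case1 seen => intro hseen _ y hy; rw [pvReachB_nil] at hy; exact hseen y hy
  | case2 seen a rest u st ih =>
    intro hseen hq y hy
    rw [pvReachB_cons] at hy
    obtain ⟨new, heq, hnew⟩ := pvVisitNbrs_shape S
      (g.getD ((a :: rest).getLast (List.cons_ne_nil a rest)) []) seen ((a :: rest).dropLast)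
    have hst1 : st.1 = seen ++ new := by rw [show st = _ from heq]
    have hst2 : st.2 = (a :: rest).dropLast ++ new := by rw [show st = _ from heq]
    have htop : pvReachable g S src ((a :: rest).getLast (List.cons_ne_nil a rest)) :=
      hseen _ (hq _ (List.getLast_mem _))
    refine ih ?_ ?_ y hy
    · rw [hst1]
      intro x hx
      rcases List.mem_append.1 hx with hx | hx
      · exact hseen x hx
      · exact .step htop (hnew x hx).1 (hnew x hx).2
    · rw [hst1, hst2]
      intro x hx
      rcases List.mem_append.1 hx with hx | hx
      · exact List.mem_append_left _
          (hq x (List.Sublist.mem hx (List.dropLast_sublist _)))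
      · exact List.mem_append_right _ hx

theorem pvReachB_closed (g : PySem.Dict Int (List Int)) (S : PySem.Set Int) :
    ∀ (seen : PySem.Set Int) (stack : List Int),
      (∀ x ∈ seen, x ∈ stack ∨ ∀ v ∈ g.getD x [], v ∈ S → v ∈ seen) →
      ∀ x ∈ pvReachB g S seen stack, ∀ v ∈ g.getD x [], v ∈ S →
        v ∈ pvReachB g S seen stack := by
  intro seen stack
  induction seen, stack using pvReachB.induct g S with
  | case1 seen =>
    intro H x hx v hv hvS
    rw [pvReachB_nil] at hx ⊢
    rcases H x hx with h | h
    · cases h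
    · exact h v hv hvS
  | case2 seen a rest u st ih =>
    intro H
    rw [pvReachB_cons]
    obtain ⟨new, heq, hnew⟩ := pvVisitNbrs_shape S
      (g.getD ((a :: rest).getLast (List.cons_ne_nil a rest)) []) seen ((a :: rest).dropLast)
    have hst1 : st.1 = seen ++ new := by rw [show st = _ from heq]
    have hst2 : st.2 = (a :: rest).dropLast ++ new := by rw [show st = _ from heq]
    refine ih ?_
    rw [hst1, hst2]
    intro x hx
    rcases List.mem_append.1 hx with hx | hx
    · rcases H x hx with hmem | hcl
      · have hsplit : x ∈ (a :: rest).dropLast ∨ x = (a :: rest).getLast (List.cons_ne_nil a rest) := by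
          have hdec := List.dropLast_append_getLast (List.cons_ne_nil a rest)
          rw [← hdec] at hmem
          rcases List.mem_append.1 hmem with h | h
          · exact Or.inl h
          · exact Or.inr (List.mem_singleton.1 h)
        rcases hsplit with hdl | rfl
        · left; exact List.mem_append_left _ hdl
        · right
          intro v hv hvS
          have := pvVisitNbrs_complete S _ seen ((a :: rest).dropLast) v hv hvS
          rw [heq] at this
          exact this
      · right; intro v hv hvS; exact List.mem_append_left _ (hcl v hv hvS)
    · left; exact List.mem_append_right _ hx

theorem pvReachB_mem_iff (g : PySem.Dict Int (List Int)) (S : PySem.Set Int) (u y : Int) :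
    y ∈ pvReachB g S (PySem.Set.ofList [u]) [u] ↔ pvReachable g S u y := by
  have hofl : PySem.Set.ofList [u] = [u] := rfl
  constructor
  · intro hy
    refine pvReachB_sound g S u _ _ ?_ ?_ y hy
    · intro x hx
      rw [hofl] at hx
      rcases List.mem_singleton.1 hx with rfl
      exact .refl
    · intro x hx; rw [hofl]; exact hx
  · intro hr
    induction hr with
    | refl => exact pvReachB_mono g S _ _ u (by rw [hofl]; exact List.mem_singleton.2 rfl)
    | step _ he hS ih =>
      refine pvReachB_closed g S _ _ ?_ _ ih _ he hS
      intro x hx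
      rw [hofl] at hx
      exact Or.inl hx

-- membership in the reverse adjacency index
theorem pvMem_radj (d : PySem.Dict Int (List Int)) (hnd : d.keys.Nodup) (u v : Int) :
    u ∈ (pvRadj d).getD v [] ↔ v ∈ d.getD u [] := by
  unfold pvRadj
  have h1 : d.items.foldl
      (fun r p => p.2.foldl (fun r w => PySem.Dict.modify r w [] (fun l => l ++ [p.1])) r)
      PySem.Dict.empty
      = (d.items.flatMap (fun p => p.2.map (fun w => (w, p.1)))).foldl
          (fun r q => PySem.Dict.modify r q.1 [] (fun l => l ++ [q.2])) PySem.Dict.empty := by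
    rw [List.foldl_flatMap]
    apply PySem.List.foldl_congr_mem
    intro acc p _
    rw [List.foldl_map]
  rw [h1, PySem.Dict.getD_foldl_modify_append]
  simp only [PySem.Dict.getD_empty, List.nil_append, List.mem_map, List.mem_filter,
    List.mem_flatMap, List.nil_append]
  constructor
  · rintro ⟨a, ⟨⟨p, hp, w', hw', heqpair⟩, hbeq⟩, ha⟩
    subst heqpair
    have hv : w' = v := by simpa using hbeq
    subst hv
    rw [← ha, PySem.Dict.getD_of_mem_items d (show (p.1, p.2) ∈ d.items from hp) hnd]
    exact hw'
  · intro hv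
    rcases Bool.eq_false_or_eq_true (d.contains u) with hc | hc
    · -- u is a key
      have hget : d.get? u = some (d.getD u []) := by
        rw [PySem.Dict.getD_eq_get?_getD]
        rcases h : d.get? u with _ | ns
        · exfalso
          rw [PySem.Dict.contains_eq_isSome_get?, h] at hc
          simp at hc
        · simp
      have hitems : (u, d.getD u []) ∈ d.items := PySem.Dict.mem_items_of_get?_eq_some d hget
      exact ⟨(v, u), ⟨⟨(u, d.getD u []), hitems, ⟨v, hv, rfl⟩⟩, by simp⟩, rfl⟩
    · rw [PySem.Dict.getD_of_not_contains d [] hc] at hv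
      cases hv

theorem pvReachable_to_radj {d : PySem.Dict Int (List Int)} (hnd : d.keys.Nodup)
    {S : PySem.Set Int} {a b : Int} (h : pvReachable d S a b) (ha : a ∈ S) :
    pvReachable (pvRadj d) S b a := by
  induction h with
  | refl => exact .refl
  | step hax he hvS ih =>
    rename_i x v
    have hxS : x ∈ S := by
      rcases pvReachable_mem_or_eq hax with h | rfl
      · exact h
      · exact ha
    exact pvReachable_head ((pvMem_radj d hnd x v).2 he) hxS ih

theorem pvReachable_of_radj {d : PySem.Dict Int (List Int)} (hnd : d.keys.Nodup)
    {S : PySem.Set Int} {r y : Int} (hr : r ∈ S) (h : pvReachable (pvRadj d) S r y) :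
    pvReachable d S y r := by
  induction h with
  | refl => exact .refl
  | step hrx he hvS ih =>
    rename_i x v
    have hxS : x ∈ S := by
      rcases pvReachable_mem_or_eq hrx with h | rfl
      · exact h
      · exact hr
    exact pvReachable_head ((pvMem_radj d hnd v x).1 he) hxS ih

-- per-SCC check: A's all-pairs BFS test equals B's two-sweep test
theorem pvCheck_eq (d : PySem.Dict Int (List Int)) (hnd : d.keys.Nodup) (scc : List Int) :
    pvCheckSccA d scc = pvCheckSccB d (pvRadj d) scc := by
  unfold pvCheckSccA pvCheckSccB
  by_cases hlen : (PySem.Set.ofList scc).length ≤ 1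
  · simp [hlen]
  · simp only [if_neg hlen]
    obtain ⟨a, t, rfl⟩ : ∃ a t, scc = a :: t := by
      cases scc with
      | nil => exact absurd (by simp [PySem.Set.ofList_nil]) hlen
      | cons a t => exact ⟨a, t, rfl⟩
    have hget : PySem.List.pyGet? (a :: t) (0 : Int) = some a := by
      simp [PySem.List.pyGet?, PySem.List.pyIdx?]
    rw [hget]
    set S := PySem.Set.ofList (a :: t) with hSdef
    have ha : a ∈ S := (PySem.Set.mem_ofList ..).2 (List.mem_cons_self)
    rw [Bool.eq_iff_iff]
    simp only [List.all_eq_true, Bool.and_eq_true, PySem.Set.equal_iff]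
    constructor
    · intro hA
      refine ⟨?_, ?_⟩
      · intro x
        rw [pvReachB_mem_iff]
        constructor
        · intro h
          rcases pvReachable_mem_or_eq h with h | rfl
          · exact h
          · exact ha
        · intro hx
          exact (pvBfsA_mem_iff d S a x).1 ((hA a ha x).2 hx)
      · intro x
        rw [pvReachB_mem_iff]
        constructor
        · intro h
          rcases pvReachable_mem_or_eq h with h | rfl
          · exact h
          · exact ha
        · intro hx
          have hxa : pvReachable d S x a :=
            (pvBfsA_mem_iff d S x a).1 ((hA x hx a).2 ha)
          exact pvReachable_to_radj hnd hxa hx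
    · rintro ⟨hf, hb⟩ u huS x
      rw [pvBfsA_mem_iff]
      constructor
      · intro h
        rcases pvReachable_mem_or_eq h with h | rfl
        · exact h
        · exact huS
      · intro hx
        have h1 : pvReachable (pvRadj d) S a u := (pvReachB_mem_iff (pvRadj d) S a u).1 ((hb u).2 huS)
        have h2 : pvReachable d S u a := pvReachable_of_radj hnd ha h1
        have h3 : pvReachable d S a x := (pvReachB_mem_iff d S a x).1 ((hf x).2 hx)
        exact pvReachable_trans h2 h3

-- the duplicate scan of A
theorem pvAddScc_eq : ∀ (scc : List Int) (s : PySem.Set Int), s.Nodup →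
    pvAddScc s scc = if (s ++ scc).Nodup then some (s ++ scc) else none := by
  intro scc
  induction scc with
  | nil => intro s hs; simp [pvAddScc, hs]
  | cons v rest ih =>
    intro s hs
    simp only [pvAddScc]
    rcases Bool.eq_false_or_eq_true (PySem.Set.contains s v) with hc | hc
    · -- v ∈ s : duplicate
      have hv : v ∈ s := (PySem.Set.contains_iff _ _).1 hc
      rw [if_pos hc, if_neg]
      intro h
      rcases List.nodup_append.1 h with ⟨-, -, hdisj⟩
      exact hdisj v hv v List.mem_cons_self rfl
    · have hv : v ∉ s := fun h => by
        rw [(PySem.Set.contains_iff _ _).2 h] at hc; cases hc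
      rw [if_neg (by rw [hc]; simp)]
      have hadd : PySem.Set.add s v = s ++ [v] := by
        simp only [PySem.Set.add]; rw [hc]; simp
      have hnodup : (s ++ [v]).Nodup := by
        rw [List.nodup_append]
        refine ⟨hs, List.nodup_singleton v, ?_⟩
        intro a ha b hb
        rcases List.mem_singleton.1 hb with rfl
        exact fun e => hv (e ▸ ha)
      rw [hadd, ih (s ++ [v]) hnodup]
      simp [List.append_assoc]

theorem pvCollect_eq : ∀ (l : List (List Int)) (s : PySem.Set Int), s.Nodup →
    pvCollectSccNodes s l = if (s ++ l.flatten).Nodup then some (s ++ l.flatten) else none := by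
  intro l
  induction l with
  | nil => intro s hs; simp [pvCollectSccNodes, hs]
  | cons scc rest ih =>
    intro s hs
    simp only [pvCollectSccNodes, pvAddScc_eq scc s hs]
    by_cases h1 : (s ++ scc).Nodup
    · rw [if_pos h1]
      show pvCollectSccNodes (s ++ scc) rest = _
      rw [ih (s ++ scc) h1]
      simp [List.append_assoc]
    · rw [if_neg h1]
      show (none : Option (PySem.Set Int)) = _
      rw [if_neg]
      intro h
      have h' : ((s ++ scc) ++ rest.flatten).Nodup := by
        simpa [List.append_assoc] using h
      exact h1 h'.of_append_left

theorem pvCollect_top (sccs : List (List Int)) :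
    pvCollectSccNodes PySem.Set.empty sccs
      = if sccs.flatten.Nodup then some sccs.flatten else none := by
  have := pvCollect_eq sccs PySem.Set.empty (by simp [PySem.Set.empty])
  simpa [PySem.Set.empty] using this

-- B's duplicate test via lengths
theorem pvOfList_len_iff (xs : List Int) :
    (PySem.Set.ofList xs).length = xs.length ↔ xs.Nodup := by
  induction xs using List.reverseRecOn with
  | nil => simp
  | append_singleton xs x ih =>
    rw [PySem.Set.ofList_append_singleton]
    rcases Bool.eq_false_or_eq_true (PySem.Set.contains (PySem.Set.ofList xs) x) with hc | hc
    · -- x already occurs in xs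
      have hx : x ∈ xs := (PySem.Set.mem_ofList ..).1 ((PySem.Set.contains_iff _ _).1 hc)
      have hadd : PySem.Set.add (PySem.Set.ofList xs) x = PySem.Set.ofList xs := by
        simp only [PySem.Set.add]; rw [hc]; simp
      rw [hadd]
      have hle := PySem.Set.length_ofList_le (xs := xs)
      constructor
      · intro h
        simp only [List.length_append, List.length_singleton] at h
        omega
      · intro h
        rcases List.nodup_append.1 h with ⟨-, -, hd⟩
        exact ((hd x hx x (List.mem_singleton.2 rfl)) rfl).elim
    · -- x is fresh
      have hx : x ∉ xs := fun h => by
        rw [(PySem.Set.contains_iff _ _).2 ((PySem.Set.mem_ofList ..).2 h)] at hc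
        exact Bool.noConfusion hc
      have hadd : PySem.Set.add (PySem.Set.ofList xs) x = PySem.Set.ofList xs ++ [x] := by
        simp only [PySem.Set.add]; rw [hc]; simp
      rw [hadd]
      simp only [List.length_append, List.length_singleton, List.nodup_append,
        List.nodup_singleton]
      constructor
      · intro h
        refine ⟨ih.1 (by omega), trivial, ?_⟩
        intro a ha b hb
        rcases List.mem_singleton.1 hb with rfl
        exact fun e => hx (e ▸ ha)
      · rintro ⟨h, -, -⟩
        have := ih.2 h
        omega

-- all-nodes sets of A and B have the same members
theorem pvMem_foldl_union (f : Int → List Int) :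
    ∀ (l : List Int) (s : PySem.Set Int) (x : Int),
      x ∈ l.foldl (fun s u => PySem.Set.union s (PySem.Set.ofList (f u))) s
        ↔ x ∈ s ∨ ∃ u ∈ l, x ∈ f u := by
  intro l
  induction l with
  | nil => intro s x; simp
  | cons a t ih =>
    intro s x
    simp only [List.foldl_cons, ih, PySem.Set.mem_union, PySem.Set.mem_ofList]
    constructor
    · rintro ((h | h) | ⟨u, hu, hx⟩)
      · exact Or.inl h
      · exact Or.inr ⟨a, List.mem_cons_self, h⟩
      · exact Or.inr ⟨u, List.mem_cons_of_mem _ hu, hx⟩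
    · rintro (h | ⟨u, hu, hx⟩)
      · exact Or.inl (Or.inl h)
      · rcases List.mem_cons.1 hu with rfl | hu'
        · exact Or.inl (Or.inr hx)
        · exact Or.inr ⟨u, hu', hx⟩

theorem pvMem_foldl_update :
    ∀ (l : List (List Int)) (s : PySem.Set Int) (x : Int),
      x ∈ l.foldl (fun s ns => PySem.Set.update s ns) s ↔ x ∈ s ∨ ∃ ns ∈ l, x ∈ ns := by
  intro l
  induction l with
  | nil => intro s x; simp
  | cons a t ih =>
    intro s x
    simp only [List.foldl_cons, ih, PySem.Set.mem_update]
    constructor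
    · rintro ((h | h) | ⟨ns, hns, hx⟩)
      · exact Or.inl h
      · exact Or.inr ⟨a, List.mem_cons_self, h⟩
      · exact Or.inr ⟨ns, List.mem_cons_of_mem _ hns, hx⟩
    · rintro (h | ⟨ns, hns, hx⟩)
      · exact Or.inl (Or.inl h)
      · rcases List.mem_cons.1 hns with rfl | hns'
        · exact Or.inl (Or.inr hx)
        · exact Or.inr ⟨ns, hns', hx⟩

theorem pvAllNodes_mem_eq (d : PySem.Dict Int (List Int)) (hnd : d.keys.Nodup) (x : Int) :
    x ∈ d.keys.foldl (fun s u => PySem.Set.union s (PySem.Set.ofList (d.getD u [])))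
        (PySem.Set.ofList d.keys)
      ↔ x ∈ d.values.foldl (fun s ns => PySem.Set.update s ns) (PySem.Set.ofList d.keys) := by
  rw [pvMem_foldl_union (fun u => d.getD u []), pvMem_foldl_update]
  simp only [PySem.Set.mem_ofList]
  constructor
  · rintro (h | ⟨u, hu, hx⟩)
    · exact Or.inl h
    · simp only [PySem.Dict.keys, List.mem_map] at hu
      obtain ⟨p, hp, rfl⟩ := hu
      rw [PySem.Dict.getD_of_mem_items d (show (p.1, p.2) ∈ d.items from hp) hnd] at hx
      exact Or.inr ⟨p.2, List.mem_map.2 ⟨p, hp, rfl⟩, hx⟩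
  · rintro (h | ⟨ns, hns, hx⟩)
    · exact Or.inl h
    · simp only [PySem.Dict.values, List.mem_map] at hns
      obtain ⟨p, hp, rfl⟩ := hns
      refine Or.inr ⟨p.1, List.mem_map.2 ⟨p, hp, rfl⟩, ?_⟩
      rw [PySem.Dict.getD_of_mem_items d (show (p.1, p.2) ∈ d.items from hp) hnd]
      exact hx

-- main assembly
theorem pvMain (adj : List (Int × List Int)) (sccs : List (List Int))
    (hpre : (adj.map Prod.fst).Nodup) :
    is_scc_decomposition adj sccs = is_scc_decomposition_alt adj sccs := by
  have hnd : (PySem.Dict.mk adj).keys.Nodup := by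
    simpa [PySem.Dict.keys_mk] using hpre
  unfold is_scc_decomposition is_scc_decomposition_alt
  by_cases hdup : sccs.flatten.Nodup
  · have hofl : PySem.Set.ofList sccs.flatten = sccs.flatten :=
      PySem.Set.ofList_eq_self_of_nodup _ hdup
    have heq2 : PySem.Set.equal sccs.flatten
        ((PySem.Dict.mk adj).keys.foldl
          (fun s u => PySem.Set.union s (PySem.Set.ofList ((PySem.Dict.mk adj).getD u [])))
          (PySem.Set.ofList (PySem.Dict.mk adj).keys))
      = PySem.Set.equal sccs.flatten
        ((PySem.Dict.mk adj).values.foldl (fun s ns => PySem.Set.update s ns)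
          (PySem.Set.ofList (PySem.Dict.mk adj).keys)) := by
      rw [Bool.eq_iff_iff]
      simp only [PySem.Set.equal_iff]
      constructor
      · intro h x
        rw [← pvAllNodes_mem_eq _ hnd x]
        exact h x
      · intro h x
        rw [pvAllNodes_mem_eq _ hnd x]
        exact h x
    have hcheck : (fun scc => pvCheckSccA (PySem.Dict.mk adj) scc)
        = fun scc => pvCheckSccB (PySem.Dict.mk adj) (pvRadj (PySem.Dict.mk adj)) scc :=
      funext (pvCheck_eq (PySem.Dict.mk adj) hnd)
    simp only [pvCollect_top, if_pos hdup, hofl, heq2, hcheck, bne_self_eq_false,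
      Bool.false_or]
  · have hne : (sccs.flatten.length != (PySem.Set.ofList sccs.flatten).length) = true := by
      rw [bne_iff_ne]
      exact fun h => hdup ((pvOfList_len_iff _).1 h.symm)
    simp only [pvCollect_top, if_neg hdup, hne, Bool.true_or, if_true]

-- ===== VERDICT (by name: the statement is the Claim_ definition above) =====
theorem is_scc_decomposition_spec : Claim_equal_is_scc_decomposition := by
  intro adj sccs _ hpre
  unfold Spec_is_scc_decomposition
  exact pvMain adj sccs hpre
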